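-- pv_equiv track=rewrite | github.com/Euer24/V1SE1_AI_september-student | opdracht_3_simulatie_student.py | is_alternate
-- ===== SOURCE A (Python) =====
-- def is_alternate(my_history, opponent_history):
--     """
--     Checkt of je tegenstander 'Alternate' is.
--
--     Args:
--         my_history (list[bool]): Een lijst met jouw gespeelde acties in het verleden.
--         opponent_history (list[bool]): Een lijst de door jouw tegenstander gespeelde acties in het verleden.
--
--     Returns:
--         bool: True als je tegenstander 'Alternate' is, anders False.
--     """
--     # We hebben minimaal 2 rondes nodig om het afwisselende patroon te herkennen
--     if len(opponent_history) < 2: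
--         return False
--
--     # Loop door alle acties van de tegenstander met hun index
--     for i in range(len(opponent_history)):
--         # Alternate speelt True op even indices (0, 2, 4, ...) en False op oneven indices (1, 3, 5, ...)
--         # Dus: als i % 2 == 0 (even), verwachten we True
--         verwachte_actie = (i % 2 == 0)
--         werkelijke_actie = opponent_history[i]
--
--         # Als de werkelijke actie niet overeenkomt met wat we verwachten,
--         # dan is het NIET Alternate
--         if werkelijke_actie != verwachte_actie:
--             return False
--
--     # Als alle acties overeenkomen met het patroon, is het Alternate!
--     return True
-- ===== SOURCE B (Python) =====
-- def is_alternate(my_history, opponent_history):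
--     if len(opponent_history) < 2:
--         return False
--     evens = opponent_history[0::2]
--     odds = opponent_history[1::2]
--     return all(evens) and not any(odds)
-- ===== Notes on version B (the rewrite author's own statement) =====
-- stated objective: alternative
-- what changed: Instead of A's index loop testing each element against i % 2 == 0 with an early return, B splits the history into its two stride-2 subsequences by slicing and decides with all(evens) and not any(odds); no per-index parity test or early-exit loop exists in B.
import Mathlib
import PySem

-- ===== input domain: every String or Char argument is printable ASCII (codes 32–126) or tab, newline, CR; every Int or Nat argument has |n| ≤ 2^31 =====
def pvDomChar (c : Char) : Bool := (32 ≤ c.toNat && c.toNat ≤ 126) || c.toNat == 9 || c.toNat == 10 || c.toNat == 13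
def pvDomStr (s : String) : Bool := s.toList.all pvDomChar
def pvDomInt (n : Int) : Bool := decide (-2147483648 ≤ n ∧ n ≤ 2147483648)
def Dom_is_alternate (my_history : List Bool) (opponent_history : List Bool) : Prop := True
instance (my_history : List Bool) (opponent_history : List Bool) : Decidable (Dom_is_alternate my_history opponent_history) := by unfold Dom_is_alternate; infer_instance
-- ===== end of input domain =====

-- B replaces A's per-index parity loop by slicing the history into its two stride-2
-- subsequences and deciding with all(evens) and not any(odds) (alternative, same cost).

-- ===== PORT A =====
-- the 'for i in range(len(opponent_history))' loop with its early 'return False'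
def pvLoopA (opp : List Bool) : List Nat → Bool
  | [] => true
  | i :: rest =>
      let verwachte_actie : Bool := decide (i % 2 = 0)
      let werkelijke_actie : Bool := opp.getD i false  -- i ∈ range(len opp), always in range
      if werkelijke_actie ≠ verwachte_actie then false
      else pvLoopA opp rest

def is_alternate (my_history : List Bool) (opponent_history : List Bool) : Bool :=
  if opponent_history.length < 2 then false
  else pvLoopA opponent_history (List.range opponent_history.length)

-- ===== PORT B =====
-- Source B: evens = opp[0::2]; odds = opp[1::2]; all(evens) and not any(odds)
-- (Python slicing never raises, so slice? is always 'some' here; .getD [] only unwraps it)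
def is_alternate_alt (my_history : List Bool) (opponent_history : List Bool) : Bool :=
  if opponent_history.length < 2 then false
  else
    let evens := (PySem.List.slice? opponent_history (some 0) none 2).getD []
    let odds := (PySem.List.slice? opponent_history (some 1) none 2).getD []
    evens.all id && !(odds.any id)

-- ===== PRECONDITION & SPEC =====
def Spec_is_alternate (my_history : List Bool) (opponent_history : List Bool) (out : Bool) : Prop := out = is_alternate_alt my_history opponent_history
instance (my_history : List Bool) (opponent_history : List Bool) (out : Bool) : Decidable (Spec_is_alternate my_history opponent_history out) := by unfold Spec_is_alternate; infer_instance

-- ===== CLAIM (what is proved, stated in full; the proofs are below) =====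
def Claim_equal_is_alternate : Prop := ∀ (my_history : List Bool) (opponent_history : List Bool), Dom_is_alternate my_history opponent_history → Spec_is_alternate my_history opponent_history (is_alternate my_history opponent_history)

-- ===== LEMMAS AND PROOFS =====

-- A's loop over any index list is an 'all' over that list
theorem pvLoopA_eq_all (opp : List Bool) (idxs : List Nat) :
    pvLoopA opp idxs = idxs.all (fun i => opp.getD i false == decide (i % 2 = 0)) := by
  induction idxs with
  | nil => rfl
  | cons i rest ih =>
      simp only [pvLoopA, List.all_cons, ih]
      by_cases h : opp.getD i false = decide (i % 2 = 0) <;> simp [Bool.beq_eq_decide_eq]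

-- xs[s::2] (s = 0 or 1) is the list of elements at indices s, s+2, s+4, …
theorem slice_stride2 (xs : List Bool) (s : Nat) (hs : s = 0 ∨ s = 1) :
    (PySem.List.slice? xs (some (s:Int)) none 2).getD []
      = (List.range ((xs.length - s + 1) / 2)).map (fun k => xs.getD (s + 2*k) false) := by
  simp only [PySem.List.slice?, PySem.List.sliceIndices]
  norm_num
  by_cases hsl : s ≤ xs.length
  · have hmin : min (s:Int) (xs.length:Int) = (s:Int) := by omega
    have hneg : ¬ ((s:Int) < 0) := by omega
    simp only [hneg, if_false, hmin]
    have hc : (if (s:Int) < (xs.length:Int) then (((xs.length:Int) - s + 2 - 1) / 2).toNat else 0)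
        = (xs.length - s + 1) / 2 := by
      split_ifs with h <;> omega
    rw [hc, ← List.filterMap_eq_map]
    apply List.filterMap_congr
    intro k hk
    rw [List.mem_range] at hk
    have hlt : s + 2*k < xs.length := by omega
    have hidx : ((s:Int) + 2*(k:Int)).toNat = s + 2*k := by omega
    rw [hidx, List.getElem?_eq_getElem hlt]
    simp [List.getElem?_eq_getElem hlt]
  · have hn : xs.length = 0 ∧ s = 1 := by omega
    obtain ⟨hn0, rfl⟩ := hn
    have hxs : xs = [] := List.eq_nil_of_length_eq_zero hn0
    subst hxs
    norm_num

theorem slice0_eq (xs : List Bool) :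
    (PySem.List.slice? xs (some 0) none 2).getD []
      = (List.range ((xs.length - 0 + 1) / 2)).map (fun k => xs.getD (0 + 2*k) false) := by
  simpa using slice_stride2 xs 0 (Or.inl rfl)

theorem slice1_eq (xs : List Bool) :
    (PySem.List.slice? xs (some 1) none 2).getD []
      = (List.range ((xs.length - 1 + 1) / 2)).map (fun k => xs.getD (1 + 2*k) false) := by
  simpa using slice_stride2 xs 1 (Or.inr rfl)

-- the stride-2 decomposition decides exactly A's pointwise parity check
theorem sliceB_eq_A (xs : List Bool) :
    (((List.range ((xs.length - 0 + 1)/2)).map (fun k => xs.getD (0 + 2*k) false)).all id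
      && !(((List.range ((xs.length - 1 + 1)/2)).map (fun k => xs.getD (1 + 2*k) false)).any id))
    = (List.range xs.length).all (fun i => xs.getD i false == decide (i % 2 = 0)) := by
  rw [Bool.eq_iff_iff]
  simp only [Bool.and_eq_true, Bool.not_eq_true', List.all_map, List.any_map, List.all_eq_true,
    List.any_eq_false, List.mem_range, Function.comp, id]
  constructor
  · rintro ⟨he, ho⟩ i hi
    rcases Nat.even_or_odd i with ⟨k, rfl⟩ | ⟨k, rfl⟩
    · have h1 : k < (xs.length - 0 + 1)/2 := by omega
      have := he k h1
      have hpar : (k + k) % 2 = 0 := by omega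
      simp only [hpar]
      simpa [two_mul] using this
    · have h1 : k < (xs.length - 1 + 1)/2 := by omega
      have := ho k h1
      have hpar : (2*k + 1) % 2 = 1 := by omega
      simp only [hpar]
      simp only [Bool.not_eq_true, List.getD_eq_getElem?_getD, Nat.add_comm] at this ⊢
      simp [this]
  · intro h
    constructor
    · intro k hk
      have hklt : 0 + 2*k < xs.length := by omega
      have := h (0 + 2*k) hklt
      have hpar : (0 + 2*k) % 2 = 0 := by omega
      simpa [hpar] using this
    · intro k hk
      have hklt : 1 + 2*k < xs.length := by omega
      have := h (1 + 2*k) hklt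
      have hpar : (1 + 2*k) % 2 = 1 := by omega
      simpa [hpar] using this

-- ===== VERDICT (by name: the statement is the Claim_ definition above) =====
theorem is_alternate_spec : Claim_equal_is_alternate := by
  intro my opp _
  unfold Spec_is_alternate is_alternate is_alternate_alt
  by_cases h : opp.length < 2
  · simp [h]
  · simp only [h, if_false, pvLoopA_eq_all, slice0_eq, slice1_eq, sliceB_eq_A]
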